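-- pv_equiv track=rewrite | github.com/tomytp/icpc-lib | latex/getlatex.py | split_flags
-- ===== SOURCE A (Python) =====
-- def split_flags(s: str) -> list[str]:
--     parts = []
--     cur = []
--     # emulate simple split by ',' ignoring empties
--     for ch in s + ',':
--         if ch == ',':
--             if cur:
--                 parts.append(''.join(cur))
--             cur = []
--         else:
--             cur.append(ch)
--     return parts
-- ===== SOURCE B (Python) =====
-- def split_flags(s: str) -> list[str]:
--     return [p for p in s.split(',') if p]
-- ===== Notes on version B (the rewrite author's own statement) =====
-- stated objective: idiomatic
-- what changed: Replaces the hand-rolled character-by-character tokenizer (sentinel comma, explicit buffer) with the builtin str.split followed by a filter dropping empty fields.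
import Mathlib
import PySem

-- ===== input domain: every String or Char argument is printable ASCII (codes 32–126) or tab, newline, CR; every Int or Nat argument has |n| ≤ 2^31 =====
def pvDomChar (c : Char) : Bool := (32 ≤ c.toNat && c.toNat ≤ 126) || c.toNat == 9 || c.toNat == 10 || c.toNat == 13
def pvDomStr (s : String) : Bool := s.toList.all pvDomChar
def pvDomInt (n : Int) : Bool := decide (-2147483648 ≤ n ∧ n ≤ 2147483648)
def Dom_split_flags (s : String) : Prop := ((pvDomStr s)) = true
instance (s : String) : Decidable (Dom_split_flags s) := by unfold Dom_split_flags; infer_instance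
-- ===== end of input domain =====

-- B replaces A's character-by-character tokenizer with the builtin split(',') plus a filter dropping empty fields (idiomatic).

-- ===== PORT A =====
-- the for-loop over `s + ','` with state (parts, cur), step for step
def splitFlagsLoopA : List Char → List Char → List String → List String
  | [], _, parts => parts
  | ch :: rest, cur, parts =>
    if ch = ',' then
      splitFlagsLoopA rest [] (if cur ≠ [] then parts ++ [String.ofList cur] else parts)
    else
      splitFlagsLoopA rest (cur ++ [ch]) parts

def split_flags (s : String) : List String :=
  splitFlagsLoopA (s.toList ++ [',']) [] []

-- ===== PORT B =====
def split_flags_alt (s : String) : List String :=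
  (match PySem.Str.split? s "," with
   | some ps => ps
   | none => []).filter (fun p => p ≠ "")

-- ===== PRECONDITION & SPEC =====
def Spec_split_flags (s : String) (out : List String) : Prop := out = split_flags_alt s
instance (s : String) (out : List String) : Decidable (Spec_split_flags s out) := by unfold Spec_split_flags; infer_instance

-- ===== CLAIM (what is proved, stated in full; the proofs are below) =====
def Claim_equal_split_flags : Prop := ∀ (s : String), Dom_split_flags s → Spec_split_flags s (split_flags s)

-- ===== LEMMAS AND PROOFS =====

-- a direct structural description of Chars.splitOn on the single-char separator ','
def splitF : List Char → List Char → List (List Char)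
  | [], rcur => [rcur.reverse]
  | c :: rest, rcur => if c = ',' then rcur.reverse :: splitF rest [] else splitF rest (c :: rcur)

theorem go_eq_splitF : ∀ (l : List Char) (fuel : Nat), l.length < fuel →
    ∀ (cur : List Char) (acc : List (List Char)),
      PySem.Chars.splitOn.go [','] fuel l cur acc = acc.reverse ++ splitF l cur := by
  intro l
  induction l with
  | nil =>
    intro fuel hf cur acc
    match fuel, hf with
    | fuel + 1, _ => simp [PySem.Chars.splitOn.go, splitF]
  | cons c rest ih =>
    intro fuel hf cur acc
    match fuel, hf with
    | fuel + 1, hf =>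
      by_cases hc : c = ','
      · subst hc
        have hpre : List.isPrefixOf [','] (',' :: rest) = true := by
          simp [List.isPrefixOf]
        rw [PySem.Chars.splitOn.go]
        simp only [hpre, if_pos, List.length_singleton, List.drop_succ_cons, List.drop_zero]
        simp only [List.length_cons] at hf
        rw [ih fuel (by omega) [] (cur.reverse :: acc)]
        simp [splitF]
      · have hpre : List.isPrefixOf [','] (c :: rest) = false := by
          simp [List.isPrefixOf]
          exact fun h => hc h.symm
        rw [PySem.Chars.splitOn.go]
        simp only [hpre, Bool.false_eq_true, if_false]
        simp only [List.length_cons] at hf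
        rw [ih fuel (by omega) (c :: cur) acc]
        rw [splitF, if_neg hc]

theorem splitOn_eq_splitF (l : List Char) :
    PySem.Chars.splitOn l [','] = splitF l [] := by
  unfold PySem.Chars.splitOn
  rw [go_eq_splitF l (l.length + 1) (by omega) [] []]
  simp

theorem ofList_ne_empty_iff (cs : List Char) : (String.ofList cs ≠ "") ↔ cs ≠ [] := by
  constructor
  · intro h hc; exact h (by simp [hc])
  · intro h hc
    apply h
    have := congrArg String.toList hc
    simpa using this

-- the loop of A computes exactly the filtered, stringified splitF
theorem loopA_eq_splitF : ∀ (l cur : List Char) (parts : List String),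
    splitFlagsLoopA (l ++ [',']) cur parts =
      parts ++ ((splitF l cur.reverse).map String.ofList).filter (fun p => p ≠ "") := by
  intro l
  induction l with
  | nil =>
    intro cur parts
    simp only [List.nil_append, splitFlagsLoopA, splitF, List.reverse_reverse,
      List.map_cons, List.map_nil, List.filter]
    by_cases h : cur = []
    · subst h; simp
    · simp [h, (ofList_ne_empty_iff cur).mpr h]
  | cons c rest ih =>
    intro cur parts
    by_cases hc : c = ','
    · subst hc
      simp only [List.cons_append, splitFlagsLoopA, if_pos]
      rw [ih [] (if cur ≠ [] then parts ++ [String.ofList cur] else parts)]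
      simp only [splitF, List.reverse_reverse]
      by_cases h : cur = []
      · subst h; simp
      · simp [h, (ofList_ne_empty_iff cur).mpr h]
    · simp only [List.cons_append, splitFlagsLoopA, if_neg hc]
      rw [ih (cur ++ [c]) parts]
      simp [splitF, hc]

-- ===== VERDICT (by name: the statement is the Claim_ definition above) =====
theorem split_flags_spec : Claim_equal_split_flags := by
  intro s _
  unfold Spec_split_flags split_flags split_flags_alt PySem.Str.split?
  have hsep : ("," : String).toList = [','] := by decide
  rw [loopA_eq_splitF s.toList [] []]
  simp [PySem.Chars.split?, hsep, splitOn_eq_splitF]
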